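-- pv_equiv track=rewrite | github.com/Yasser-Jemli/Resume_Analyzer | CV_PARSER_MODEL/parsers/ResumeInfoExtractor.py | _find_next_section
-- ===== SOURCE A (Python) =====
-- def _find_next_section(text, start_pos):
--     """Find the start of the next section after a given position"""
--     section_markers = [
--         "education",
--         "experience",
--         "skills",
--         "expertise",
--         "projects",
--         "certifications",
--         "languages",
--         "interests",
--         "publications",
--         "references"
--     ]
--
--     # Find all section starts after the given position
--     next_pos = float('inf')
--     for marker in section_markers:
--         pos = text.find(marker, start_pos + 1)  # +1 to avoid finding current section
--         if pos != -1:  # Found a section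
--             next_pos = min(next_pos, pos)
--
--     return next_pos if next_pos != float('inf') else len(text)
-- ===== SOURCE B (Python) =====
-- def _find_next_section(text, start_pos):
--     """Find the start of the next section after a given position.
--
--     Scan the text once, left to right, and return the first index after
--     start_pos at which a section marker begins; len(text) if there is none.
--     """
--     markers = (
--         "education", "experience", "skills", "expertise", "projects",
--         "certifications", "languages", "interests", "publications", "references",
--     )
--     n = len(text)
--     for i in range(max(0, start_pos + 1), n):
--         if text.startswith(markers, i):
--             return i
--     return n
-- ===== Notes on version B (the rewrite author's own statement) =====
-- stated objective: alternative
-- what changed: Replaces the ten independent str.find scans whose minimum is taken by a single left-to-right scan that returns the first position after start_pos at which any marker begins (startswith with a marker tuple), with len(text) as the no-match fallback.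
-- intended difference: For start_pos <= -2 where a section marker begins before the wrapped index len(text)+start_pos+1, A restarts the search near the end of the text (str.find's negative-start wraparound) and returns a position at or after that index (or len(text)), while B scans forward from the start of the text and returns the first marker position, which is the intended 'next section after an out-of-range position'. — e.g. on _find_next_section("skillsZ", -2): A returns 7, B returns 0
import Mathlib
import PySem

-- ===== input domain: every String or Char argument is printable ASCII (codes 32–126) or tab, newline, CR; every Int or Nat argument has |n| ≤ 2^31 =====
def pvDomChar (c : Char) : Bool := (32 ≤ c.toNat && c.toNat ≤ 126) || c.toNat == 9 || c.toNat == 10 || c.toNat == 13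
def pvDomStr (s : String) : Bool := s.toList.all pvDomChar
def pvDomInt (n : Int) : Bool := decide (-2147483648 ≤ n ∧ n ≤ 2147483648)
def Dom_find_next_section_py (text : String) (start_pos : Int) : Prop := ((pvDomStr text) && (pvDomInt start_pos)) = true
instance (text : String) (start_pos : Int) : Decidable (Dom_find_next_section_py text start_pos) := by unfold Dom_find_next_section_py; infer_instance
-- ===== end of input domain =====

-- B replaces the ten independent str.find scans (min taken afterwards) by one
-- left-to-right scan returning the first position past start_pos where any marker
-- begins (objective: alternative single-pass formulation); on start_pos ≤ -2 with a
-- marker before the wrapped index, A's str.find wraparound value differs and is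
-- stated as the intended difference D_ below.

-- ===== PORT A =====
-- the section-marker list of A (a local list in the Python; named here so the fold is readable)
def pvMarkersA : List String :=
  ["education", "experience", "skills", "expertise", "projects",
   "certifications", "languages", "interests", "publications", "references"]

-- 'next_pos = float('inf')' modeled as Option Int: none = inf (never a returned value)
def find_next_section_py (text : String) (start_pos : Int) : Int :=
  let next_pos : Option Int := pvMarkersA.foldl
    (fun np marker =>
      let pos := PySem.Str.findFrom text marker (start_pos + 1) none
      if pos ≠ -1 then
        some (match np with
              | none => pos
              | some v => min v pos)
      else np) none
  match next_pos with
  | some v => v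
  | none => PySem.Str.len text

-- ===== PORT B =====
-- the same markers, as the tuple of Source B (character lists, B works on text.toList)
def pvMarkersB : List (List Char) :=
  ["education".toList, "experience".toList, "skills".toList, "expertise".toList,
   "projects".toList, "certifications".toList, "languages".toList, "interests".toList,
   "publications".toList, "references".toList]

-- 'for i in range(s, n): if text.startswith(markers, i): return i' / 'return n'
-- (structural recursion on the number of remaining loop iterations, len(text) - i)
def pvScanAux (cs : List Char) (i : Nat) : Nat → Int
  | 0 => (cs.length : Int)
  | d + 1 =>
    if pvMarkersB.any (fun m => PySem.Chars.startswith (cs.drop i) m) then (i : Int)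
    else pvScanAux cs (i + 1) d

def pvScan (cs : List Char) (i : Nat) : Int := pvScanAux cs i (cs.length - i)

def find_next_section_py_alt (text : String) (start_pos : Int) : Int :=
  let cs := text.toList
  let s : Int := max 0 (start_pos + 1)
  pvScan cs s.toNat

-- ===== PRECONDITION & SPEC =====
-- On start_pos ≤ -2 where some section marker begins before the wrapped index
-- len(text)+start_pos+1, A restarts the search near the END of the text (str.find's
-- negative-start wraparound) and returns a later position or len(text), while B scans
-- forward from the beginning of the text and returns the first marker position, which
-- is the intended 'next section after an out-of-range position'.
-- 'a marker occurrence starts before index k' ⟺ 'the marker is an infix of the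
-- first k - 1 + len(marker) characters'
def D_find_next_section_py (text : String) (start_pos : Int) : Prop :=
  start_pos + 1 < 0 ∧
  ∃ m ∈ pvMarkersA, m.toList <:+:
    text.toList.take (((text.toList.length : Int) + start_pos + 1).toNat + m.toList.length - 1)
instance (text : String) (start_pos : Int) : Decidable (D_find_next_section_py text start_pos) := by unfold D_find_next_section_py; infer_instance

def Spec_find_next_section_py (text : String) (start_pos : Int) (out : Int) : Prop := ¬ D_find_next_section_py text start_pos → out = find_next_section_py_alt text start_pos
instance (text : String) (start_pos : Int) (out : Int) : Decidable (Spec_find_next_section_py text start_pos out) := by unfold Spec_find_next_section_py; infer_instance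

def pvDiffWitness_find_next_section_py : String × Int := ("skillsZ", -2)
def pvDiffWitnessOut_find_next_section_py : Int × Int := (7, 0)

-- ===== CLAIM (what is proved, stated in full; the proofs are below) =====
def Claim_unchanged_find_next_section_py : Prop := ∀ (text : String) (start_pos : Int), Dom_find_next_section_py text start_pos → Spec_find_next_section_py text start_pos (find_next_section_py text start_pos)
def Claim_changed_find_next_section_py : Prop := Dom_find_next_section_py (pvDiffWitness_find_next_section_py.1) (pvDiffWitness_find_next_section_py.2) ∧ D_find_next_section_py (pvDiffWitness_find_next_section_py.1) (pvDiffWitness_find_next_section_py.2) ∧ find_next_section_py (pvDiffWitness_find_next_section_py.1) (pvDiffWitness_find_next_section_py.2) = pvDiffWitnessOut_find_next_section_py.1 ∧ find_next_section_py_alt (pvDiffWitness_find_next_section_py.1) (pvDiffWitness_find_next_section_py.2) = pvDiffWitnessOut_find_next_section_py.2 ∧ pvDiffWitnessOut_find_next_section_py.1 ≠ pvDiffWitnessOut_find_next_section_py.2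
def Claim_exact_find_next_section_py : Prop := ∀ (text : String) (start_pos : Int), Dom_find_next_section_py text start_pos → D_find_next_section_py text start_pos → find_next_section_py text start_pos ≠ find_next_section_py_alt text start_pos

-- ===== LEMMAS AND PROOFS =====

-- pvScan satisfies the while-style unfolding used by the proofs
lemma pvScan_eq (cs : List Char) (i : Nat) :
    pvScan cs i =
      if i < cs.length then
        (if pvMarkersB.any (fun m => PySem.Chars.startswith (cs.drop i) m) then (i : Int)
         else pvScan cs (i + 1))
      else (cs.length : Int) := by
  unfold pvScan
  by_cases h : i < cs.length
  · have hd : cs.length - i = (cs.length - (i + 1)) + 1 := by omega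
    rw [hd, if_pos h]
    rfl
  · have hd : cs.length - i = 0 := by omega
    rw [hd, if_neg h]
    rfl

-- A's fold, abstracted over the start index (proof-side mirror of port A's loop)
def pvF (cs : List Char) (ms : List String) (k : Int) (init : Option Int) : Option Int :=
  ms.foldl
    (fun np marker =>
      let pos := PySem.Chars.findFrom cs marker.toList k none
      if pos ≠ -1 then
        some (match np with
              | none => pos
              | some v => min v pos)
      else np) init

lemma pvF_cons (cs : List Char) (m : String) (ms : List String) (k : Int) (init : Option Int) :
    pvF cs (m :: ms) k init =
      pvF cs ms k
        (if PySem.Chars.findFrom cs m.toList k none ≠ -1 then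
           some (match init with
                 | none => PySem.Chars.findFrom cs m.toList k none
                 | some v => min v (PySem.Chars.findFrom cs m.toList k none))
         else init) := rfl

-- port A written through pvF
lemma pvA_eq (text : String) (start_pos : Int) :
    find_next_section_py text start_pos =
      (match pvF text.toList pvMarkersA (start_pos + 1) none with
       | some v => v
       | none => (text.toList.length : Int)) := by
  simp only [find_next_section_py, pvF, PySem.Str.findFrom_eq, PySem.Str.len_eq]

-- the markers of the two ports (and of D_) coincide
lemma pvMarkers_eq : pvMarkersB = pvMarkersA.map String.toList := rfl

lemma pvMarkers_ne_nil : ∀ m ∈ pvMarkersA, m.toList ≠ [] := by decide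

-- B's any-test decides "some marker is a prefix at position k"
lemma pvAny_iff (cs : List Char) (k : Nat) :
    (pvMarkersB.any (fun m => PySem.Chars.startswith (cs.drop k) m) = true) ↔
      ∃ m ∈ pvMarkersA, m.toList <+: cs.drop k := by
  rw [pvMarkers_eq]
  simp [List.any_map, List.any_eq_true, PySem.Chars.startswith_iff]

-- a nonempty pattern is an infix of the first k-1+|sub| characters
-- iff it occurs starting at some index below k
lemma pvInfix_take_iff (cs sub : List Char) (k : Nat) (hsub : sub ≠ []) :
    (sub <:+: cs.take (k + sub.length - 1)) ↔ ∃ i, i < k ∧ sub <+: cs.drop i := by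
  have hlen : 1 ≤ sub.length := List.length_pos_iff.mpr hsub
  constructor
  · intro hinf
    obtain ⟨t, hpre, hsuf⟩ := List.infix_iff_prefix_suffix.mp hinf
    obtain ⟨i, hi⟩ : ∃ i, t = (cs.take (k + sub.length - 1)).drop i :=
      ⟨_, (List.suffix_iff_eq_drop.mp hsuf)⟩
    subst hi
    rw [List.drop_take] at hpre
    obtain ⟨h1, h2⟩ := List.prefix_take_iff.mp hpre
    exact ⟨i, by omega, h1⟩
  · rintro ⟨i, hik, hpre⟩
    have h1 : sub <+: (cs.drop i).take (k + sub.length - 1 - i) :=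
      List.prefix_take_iff.mpr ⟨hpre, by omega⟩
    rw [← List.drop_take] at h1
    exact h1.isInfix.trans (List.drop_suffix _ _).isInfix

-- D_ unfolded to 'some marker begins at an index below the wrapped start'
lemma pvD_iff (text : String) (start_pos : Int) :
    D_find_next_section_py text start_pos ↔
      (start_pos + 1 < 0 ∧ ∃ i, i < ((text.toList.length : Int) + start_pos + 1).toNat ∧
        ∃ m ∈ pvMarkersA, m.toList <+: text.toList.drop i) := by
  unfold D_find_next_section_py
  constructor
  · rintro ⟨hneg, m, hm, hinf⟩
    obtain ⟨i, hik, hpre⟩ := (pvInfix_take_iff _ _ _ (pvMarkers_ne_nil m hm)).mp hinf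
    exact ⟨hneg, i, hik, m, hm, hpre⟩
  · rintro ⟨hneg, i, hik, m, hm, hpre⟩
    exact ⟨hneg, m, hm, (pvInfix_take_iff _ _ _ (pvMarkers_ne_nil m hm)).mpr ⟨i, hik, hpre⟩⟩

-- str.find(sub, start) for start past the end is -1
lemma pvFindFrom_big (cs sub : List Char) (st : Int) (hst : (cs.length : Int) < st) :
    PySem.Chars.findFrom cs sub st none = -1 := by
  simp only [PySem.Chars.findFrom]
  split_ifs with h1 h2 <;> omega

-- a negative start wraps to max 0 (n + st)
lemma pvFindFrom_neg (cs sub : List Char) (st : Int) (hst : st < 0) :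
    PySem.Chars.findFrom cs sub st none =
      PySem.Chars.findFrom cs sub (max 0 ((cs.length : Int) + st)) none := by
  simp only [PySem.Chars.findFrom]
  have h0 : ¬ (max 0 ((cs.length : Int) + st) < 0) := by omega
  have harg : (if st < 0 then if st + (cs.length : Int) < 0 then 0 else st + cs.length else st)
      = max 0 ((cs.length : Int) + st) := by split_ifs <;> omega
  rw [harg]
  split_ifs with h <;> simp_all

-- a marker that is a prefix at k is found exactly at k
lemma pvFindFrom_at (cs sub : List Char) (k : Nat) (hk : k ≤ cs.length)
    (h : sub <+: cs.drop k) :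
    PySem.Chars.findFrom cs sub (k : Int) none = (k : Int) := by
  rw [PySem.Chars.findFrom_natCast cs sub k hk]
  have hinf : sub <:+: cs.drop k := h.isInfix
  have hne : PySem.Chars.find (cs.drop k) sub ≠ -1 :=
    (PySem.Chars.find_ne_neg_one_iff _ _).mpr hinf
  have hnn : 0 ≤ PySem.Chars.find (cs.drop k) sub :=
    (PySem.Chars.find_nonneg_iff _ _).mpr hinf
  have hspec := PySem.Chars.find_spec (s := cs.drop k) (sub := sub) hnn
  have hz : PySem.Chars.find (cs.drop k) sub = 0 := by
    by_contra hnz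
    have hpos : 0 < (PySem.Chars.find (cs.drop k) sub).toNat := by omega
    exact hspec.2 0 hpos (by simpa using h)
  simp [hz]

-- if no marker matches at k itself, find from k equals find from k+1
lemma pvFindFrom_shift (cs sub : List Char) (k : Nat) (hk : k < cs.length)
    (hnp : ¬ sub <+: cs.drop k) :
    PySem.Chars.findFrom cs sub (k : Int) none = PySem.Chars.findFrom cs sub ((k + 1 : Nat) : Int) none := by
  have hk' : k ≤ cs.length := le_of_lt hk
  have hk1 : k + 1 ≤ cs.length := hk
  have hcons : cs.drop k = cs[k] :: cs.drop (k + 1) := List.drop_eq_getElem_cons hk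
  by_cases h1 : PySem.Chars.findFrom cs sub ((k + 1 : Nat) : Int) none = -1
  · rw [h1, PySem.Chars.findFrom_natCast_eq_neg_one_iff cs sub k hk']
    rw [PySem.Chars.findFrom_natCast_eq_neg_one_iff cs sub (k+1) hk1] at h1
    rw [hcons, List.infix_cons_iff, not_or]
    exact ⟨by rw [← hcons]; exact hnp, h1⟩
  · obtain ⟨hge1, hpre1, hmin1⟩ := PySem.Chars.findFrom_natCast_spec cs sub (k+1) hk1 h1
    have h0 : PySem.Chars.findFrom cs sub (k : Int) none ≠ -1 := by
      rw [ne_eq, PySem.Chars.findFrom_natCast_eq_neg_one_iff cs sub k hk']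
      intro hno
      exact hno (by
        have : sub <+: (cs.drop k).drop ((PySem.Chars.findFrom cs sub ((k+1:Nat) : Int) none).toNat - k) := by
          rw [List.drop_drop]
          have : k + ((PySem.Chars.findFrom cs sub ((k+1:Nat) : Int) none).toNat - k)
              = (PySem.Chars.findFrom cs sub ((k+1:Nat) : Int) none).toNat := by omega
          rw [this]; exact hpre1
        exact this.isInfix.trans (List.drop_suffix _ _).isInfix)
    obtain ⟨hge0, hpre0, hmin0⟩ := PySem.Chars.findFrom_natCast_spec cs sub k hk' h0
    set j0 := PySem.Chars.findFrom cs sub (k : Int) none with hj0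
    set j1 := PySem.Chars.findFrom cs sub ((k + 1 : Nat) : Int) none with hj1
    have hj0k : j0.toNat ≠ k := by
      intro hEq; exact hnp (by rw [← hEq]; exact hpre0)
    have h01 : ¬ j1.toNat < j0.toNat := fun hlt => hmin0 j1.toNat (by omega) hlt hpre1
    have h10 : ¬ j0.toNat < j1.toNat := fun hlt => hmin1 j0.toNat (by omega) hlt hpre0
    omega

-- findFrom at the right end is -1 for every nonempty marker
lemma pvFindFrom_end (cs sub : List Char) (hsub : sub ≠ []) :
    PySem.Chars.findFrom cs sub ((cs.length : Nat) : Int) none = -1 := by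
  rw [PySem.Chars.findFrom_natCast_eq_neg_one_iff cs sub cs.length le_rfl]
  simp [hsub]

-- positions returned by findFrom from k are ≥ k
lemma pvFindFrom_ge (cs sub : List Char) (k : Nat) (hk : k ≤ cs.length)
    (h : PySem.Chars.findFrom cs sub (k : Int) none ≠ -1) :
    (k : Int) ≤ PySem.Chars.findFrom cs sub (k : Int) none :=
  (PySem.Chars.findFrom_natCast_spec cs sub k hk h).1

-- once the accumulator is `some k`, it stays `some k`
lemma pvF_keep (cs : List Char) (k : Nat) (hk : k ≤ cs.length) :
    ∀ ms : List String, pvF cs ms (k : Int) (some (k : Int)) = some (k : Int) := by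
  intro ms
  induction ms with
  | nil => rfl
  | cons m tl ih =>
    rw [pvF_cons]
    by_cases h : PySem.Chars.findFrom cs m.toList (k : Int) none = -1
    · rw [if_neg (not_not_intro h)]; exact ih
    · have hge := pvFindFrom_ge cs m.toList k hk h
      rw [if_pos h]
      simpa [min_eq_left hge] using ih

-- if some remaining marker matches at k, the fold ends in `some k`
lemma pvF_match (cs : List Char) (k : Nat) (hk : k ≤ cs.length) :
    ∀ (ms : List String) (init : Option Int),
      (init = none ∨ ∃ v, init = some v ∧ (k : Int) ≤ v) →
      (∃ m ∈ ms, m.toList <+: cs.drop k) →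
      pvF cs ms (k : Int) init = some (k : Int) := by
  intro ms
  induction ms with
  | nil => rintro init _ ⟨m, hm, _⟩; exact absurd hm (List.not_mem_nil)
  | cons m tl ih =>
    rintro init hinit ⟨m', hm', hpre'⟩
    rw [pvF_cons]
    by_cases hm : m.toList <+: cs.drop k
    · have hfind := pvFindFrom_at cs m.toList k hk hm
      rw [hfind, if_pos (show ((k : Int)) ≠ -1 by omega)]
      rcases hinit with h | ⟨v, hv, hkv⟩
      · subst h; exact pvF_keep cs k hk tl
      · subst hv
        simpa [min_eq_right hkv] using pvF_keep cs k hk tl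
    · have hm'tl : m' ∈ tl := by
        rcases List.mem_cons.mp hm' with h | h
        · exact absurd (h ▸ hpre') hm
        · exact h
      by_cases h : PySem.Chars.findFrom cs m.toList (k : Int) none = -1
      · simp only [h]
        exact ih _ (by simpa using hinit) ⟨m', hm'tl, hpre'⟩
      · have hge := pvFindFrom_ge cs m.toList k hk h
        rw [if_pos h]
        refine ih _ ?_ ⟨m', hm'tl, hpre'⟩
        right
        rcases hinit with hi | ⟨v, hv, hkv⟩
        · subst hi; exact ⟨_, rfl, hge⟩
        · subst hv
          exact ⟨_, rfl, le_min hkv hge⟩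

-- if every remaining marker yields -1, the fold keeps its accumulator
lemma pvF_all_fail (cs : List Char) (kk : Int) :
    ∀ (ms : List String) (init : Option Int),
      (∀ m ∈ ms, PySem.Chars.findFrom cs m.toList kk none = -1) →
      pvF cs ms kk init = init := by
  intro ms
  induction ms with
  | nil => intro init _; rfl
  | cons m tl ih =>
    intro init hall
    rw [pvF_cons]
    have hm := hall m (List.mem_cons_self ..)
    simp only [hm]
    simpa using ih init (fun m' hm' => hall m' (List.mem_cons_of_mem _ hm'))

-- if no marker matches at k itself, the whole fold is the fold from k+1
lemma pvF_step (cs : List Char) (k : Nat) (hk : k < cs.length)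
    (hno : ∀ m ∈ pvMarkersA, ¬ m.toList <+: cs.drop k) :
    ∀ (ms : List String), (∀ m ∈ ms, m ∈ pvMarkersA) →
      ∀ init, pvF cs ms (k : Int) init = pvF cs ms ((k + 1 : Nat) : Int) init := by
  intro ms
  induction ms with
  | nil => intro _ init; rfl
  | cons m tl ih =>
    intro hsub init
    rw [pvF_cons, pvF_cons]
    rw [pvFindFrom_shift cs m.toList k hk (hno m (hsub m (List.mem_cons_self ..)))]
    exact ih (fun m' hm' => hsub m' (List.mem_cons_of_mem _ hm')) _

-- the core equivalence: from any position k ≤ n, A's min-of-finds equals B's scan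
lemma pvCore (cs : List Char) :
    ∀ (d k : Nat), k ≤ cs.length → cs.length - k = d →
      (match pvF cs pvMarkersA (k : Int) none with
       | some v => v
       | none => (cs.length : Int)) = pvScan cs k := by
  intro d
  induction d with
  | zero =>
    intro k hk hd
    have hkn : k = cs.length := by omega
    subst hkn
    have hall : ∀ m ∈ pvMarkersA, PySem.Chars.findFrom cs m.toList (cs.length : Int) none = -1 :=
      fun m hm => pvFindFrom_end cs m.toList (pvMarkers_ne_nil m hm)
    rw [pvF_all_fail cs _ pvMarkersA none hall, pvScan_eq]
    simp
  | succ d ih =>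
    intro k hk hd
    have hklt : k < cs.length := by omega
    by_cases hany : pvMarkersB.any (fun m => PySem.Chars.startswith (cs.drop k) m) = true
    · have hex := (pvAny_iff cs k).mp hany
      rw [pvF_match cs k (le_of_lt hklt) pvMarkersA none (Or.inl rfl) hex]
      rw [pvScan_eq]
      simp [hklt, hany]
    · have hno : ∀ m ∈ pvMarkersA, ¬ m.toList <+: cs.drop k := by
        intro m hm hpre
        exact hany ((pvAny_iff cs k).mpr ⟨m, hm, hpre⟩)
      rw [pvF_step cs k hklt hno pvMarkersA (fun _ h => h) none]
      rw [pvScan_eq, if_pos hklt, if_neg hany]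
      exact ih (k + 1) hklt (by omega)

-- fold congruence in the start argument
lemma pvF_congr (cs : List Char) (a b : Int) :
    ∀ (ms : List String),
      (∀ m ∈ ms, PySem.Chars.findFrom cs m.toList a none = PySem.Chars.findFrom cs m.toList b none) →
      ∀ init, pvF cs ms a init = pvF cs ms b init := by
  intro ms
  induction ms with
  | nil => intro _ _; rfl
  | cons m tl ih =>
    intro h init
    rw [pvF_cons, pvF_cons, h m (List.mem_cons_self ..)]
    exact ih (fun m' hm' => h m' (List.mem_cons_of_mem _ hm')) _

-- skipping hit-free positions leaves the scan unchanged
lemma pvScan_skip (cs : List Char) :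
    ∀ (d j K : Nat), K ≤ cs.length → j + d = K →
      (∀ i, j ≤ i → i < K → ¬ ∃ m ∈ pvMarkersA, m.toList <+: cs.drop i) →
      pvScan cs j = pvScan cs K := by
  intro d
  induction d with
  | zero => intro j K _ hd _; rw [show j = K by omega]
  | succ d ih =>
    intro j K hK hd hno
    have hj : j < cs.length := by omega
    rw [pvScan_eq, if_pos hj, if_neg]
    · exact ih (j+1) K hK (by omega) (fun i h1 h2 => hno i (by omega) h2)
    · intro hb
      exact hno j le_rfl (by omega) ((pvAny_iff cs j).mp hb)

-- the scan from j returns at least j (for j within the text)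
lemma pvScan_ge (cs : List Char) :
    ∀ (d j : Nat), cs.length - j = d → j ≤ cs.length → (j : Int) ≤ pvScan cs j := by
  intro d
  induction d with
  | zero =>
    intro j hd hj
    rw [pvScan_eq, if_neg (by omega)]
    omega
  | succ d ih =>
    intro j hd hj
    have hjlt : j < cs.length := by omega
    rw [pvScan_eq, if_pos hjlt]
    split_ifs with h
    · omega
    · have := ih (j+1) (by omega) hjlt
      omega
-- a hit at i bounds the scan from any j ≤ i
lemma pvScan_le_of_hit (cs : List Char) :
    ∀ (d j i : Nat), j + d = i → i < cs.length →
      (∃ m ∈ pvMarkersA, m.toList <+: cs.drop i) →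
      pvScan cs j ≤ (i : Int) := by
  intro d
  induction d with
  | zero =>
    intro j i hd hi hhit
    have hji : j = i := by omega
    subst hji
    rw [pvScan_eq, if_pos hi, if_pos ((pvAny_iff cs _).mpr hhit)]
  | succ d ih =>
    intro j i hd hi hhit
    have hj : j < cs.length := by omega
    rw [pvScan_eq, if_pos hj]
    split_ifs with h
    · omega
    · exact ih (j+1) i (by omega) hi hhit

-- A rewritten as a scan from the (possibly wrapped) start index
lemma pvA_scan (text : String) (start_pos : Int) (hneg : start_pos + 1 < 0) :
    find_next_section_py text start_pos =
      pvScan text.toList (((text.toList.length : Int) + start_pos + 1).toNat) := by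
  rw [pvA_eq]
  have hK0 : 0 ≤ max 0 ((text.toList.length : Int) + (start_pos + 1)) := le_max_left _ _
  have hcast : (((max 0 ((text.toList.length : Int) + (start_pos + 1))).toNat : Nat) : Int)
      = max 0 ((text.toList.length : Int) + (start_pos + 1)) := Int.toNat_of_nonneg hK0
  have hF : pvF text.toList pvMarkersA (start_pos + 1) none
      = pvF text.toList pvMarkersA
          (((max 0 ((text.toList.length : Int) + (start_pos + 1))).toNat : Nat) : Int) none := by
    refine pvF_congr text.toList (start_pos + 1) _ pvMarkersA ?_ none
    intro m _
    rw [pvFindFrom_neg text.toList m.toList (start_pos + 1) hneg, hcast]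
  rw [hF, pvCore text.toList _ _ (by omega) rfl]
  have : (max 0 ((text.toList.length : Int) + (start_pos + 1))).toNat
      = ((text.toList.length : Int) + start_pos + 1).toNat := by omega
  rw [this]

-- ===== VERDICT (by name: the statement is the Claim_ definition above) =====
theorem find_next_section_py_spec : Claim_unchanged_find_next_section_py := by
  intro text start_pos _dom
  unfold Spec_find_next_section_py
  intro hD
  simp only [find_next_section_py_alt]
  by_cases hneg : start_pos + 1 < 0
  · -- negative start: A scans from the wrapped index, B from 0; ¬D says no hit in between
    rw [pvA_scan text start_pos hneg]
    have hmax : (max 0 (start_pos + 1)).toNat = 0 := by omega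
    rw [hmax]
    have hno : ∀ i, 0 ≤ i → i < ((text.toList.length : Int) + start_pos + 1).toNat →
        ¬ ∃ m ∈ pvMarkersA, m.toList <+: text.toList.drop i := by
      intro i _ hik hhit
      exact hD ((pvD_iff text start_pos).mpr ⟨hneg, i, hik, hhit⟩)
    exact (pvScan_skip text.toList (((text.toList.length : Int) + start_pos + 1).toNat) 0
      _ (by omega) (by omega) hno).symm
  · rw [pvA_eq]
    have hmax : (max 0 (start_pos + 1)) = start_pos + 1 := by omega
    rw [hmax]
    by_cases hbig : (text.toList.length : Int) < start_pos + 1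
    · -- start past the end: A finds nothing, B's scan range is empty
      have hall : ∀ m ∈ pvMarkersA,
          PySem.Chars.findFrom text.toList m.toList (start_pos + 1) none = -1 :=
        fun m _ => pvFindFrom_big text.toList m.toList (start_pos + 1) hbig
      rw [pvF_all_fail text.toList (start_pos + 1) pvMarkersA none hall]
      rw [pvScan_eq, if_neg (by omega)]
    · -- 0 ≤ start: the scan starts exactly at start_pos + 1
      have hcast : (((start_pos + 1).toNat : Nat) : Int) = start_pos + 1 :=
        Int.toNat_of_nonneg (by omega)
      have hF : pvF text.toList pvMarkersA (start_pos + 1) none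
          = pvF text.toList pvMarkersA (((start_pos + 1).toNat : Nat) : Int) none := by
        rw [hcast]
      rw [hF, pvCore text.toList (text.toList.length - (start_pos + 1).toNat)
        (start_pos + 1).toNat (by omega) rfl]

theorem find_next_section_py_changed : Claim_changed_find_next_section_py := by
  unfold Claim_changed_find_next_section_py; decide

theorem find_next_section_py_tight : Claim_exact_find_next_section_py := by
  intro text start_pos _dom hD
  obtain ⟨hneg, i, hi, hhit⟩ := (pvD_iff text start_pos).mp hD
  have hin : i < text.toList.length := by omega
  rw [pvA_scan text start_pos hneg]
  have hB : find_next_section_py_alt text start_pos = pvScan text.toList 0 := by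
    simp only [find_next_section_py_alt]
    rw [show (max 0 (start_pos + 1)).toNat = 0 by omega]
  rw [hB]
  have h1 : ((((text.toList.length : Int) + start_pos + 1).toNat : Nat) : Int)
      ≤ pvScan text.toList (((text.toList.length : Int) + start_pos + 1).toNat) :=
    pvScan_ge text.toList _ _ rfl (by omega)
  have h2 : pvScan text.toList 0 ≤ (i : Int) :=
    pvScan_le_of_hit text.toList i 0 i (by omega) hin hhit
  intro hEq
  omega
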